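-- pv_equiv track=rewrite | github.com/matias-lg/taller-prog-comp | tarea5/c.py | prefix_hash
-- ===== SOURCE A (Python) =====
-- m = 10**9 + 7
--
-- z = 127
--
-- def prefix_hash(s):
--     v = [0]*len(s)
--     v[-1] = ord(s[-1])
--     i = len(s) - 2
--     while(i >= 0):
--         v[i] = (v[i+1]*z + ord(s[i]))%m
--         i -= 1
--     return v
-- ===== SOURCE B (Python) =====
-- m = 10**9 + 7
--
-- z = 127
--
-- def prefix_hash(s):
--     # divide and conquer: hash each half recursively, then lift the left half's
--     # suffix hashes over the right half with a modular power of z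
--     n = len(s)
--     if n == 1:
--         return [ord(s[0])]
--     mid = n // 2
--     left = prefix_hash(s[:mid])
--     right = prefix_hash(s[mid:])
--     return [(left[i] + pow(z, mid - i, m) * right[0]) % m for i in range(mid)] + right
-- ===== Notes on version B (the rewrite author's own statement) =====
-- stated objective: alternative
-- what changed: B computes the suffix-hash array by divide and conquer: it recursively hashes the two halves of the string and lifts the left half's entries over the right half with a modular power pow(z, mid-i, m), instead of A's single backward sweep filling a preallocated array via v[i+1] reads; Pre_ excludes the empty string, on which A raises IndexError (B also raises there).
import Mathlib
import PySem

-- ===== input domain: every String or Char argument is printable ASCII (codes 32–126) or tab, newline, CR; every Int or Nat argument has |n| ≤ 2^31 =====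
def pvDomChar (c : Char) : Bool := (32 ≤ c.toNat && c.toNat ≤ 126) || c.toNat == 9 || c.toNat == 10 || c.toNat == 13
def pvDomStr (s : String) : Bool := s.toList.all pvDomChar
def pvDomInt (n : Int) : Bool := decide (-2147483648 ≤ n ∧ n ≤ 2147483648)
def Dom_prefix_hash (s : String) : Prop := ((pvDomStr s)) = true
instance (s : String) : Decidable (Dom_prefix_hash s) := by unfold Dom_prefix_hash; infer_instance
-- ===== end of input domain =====

-- B replaces A's single backward sweep over a preallocated array with a divide-and-conquer:
-- hash each half recursively and lift the left half's entries over the right half with a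
-- modular power of z (alternative algorithm, same results; both raise on the empty string).

-- ord(c): exact on the ASCII domain (Char code as Int)
def pvOrd (c : Char) : Int := (c.toNat : Int)

-- ===== PORT A =====
-- the while loop of A: fuel k means the current index i = k-1; v[i] := (v[i+1]*z + ord(s[i])) % m
-- (indices are in range for every nonempty s, so getD/set are exact transliterations here)
def loopA (cs : List Char) : Nat → List Int → List Int
  | 0, v => v
  | Nat.succ k, v =>
      loopA cs k (v.set k (PySem.Int.mod (v.getD (k+1) 0 * 127 + pvOrd (cs.getD k ' ')) 1000000007))

def prefix_hash (s : String) : List Int :=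
  let cs := s.toList
  let n := cs.length
  -- v = [0]*len(s); v[-1] = ord(s[-1])  (Pre_ guarantees n ≥ 1, so index -1 is n-1)
  let v := (List.replicate n (0 : Int)).set (n - 1) (pvOrd (cs.getD (n - 1) ' '))
  loopA cs (n - 1) v

-- ===== PORT B =====
-- the divide-and-conquer of Source B; fuel only makes the recursion total (Python B's recursion
-- depth is ≤ length, and it does not terminate on "", which Pre_ excludes).
-- pow(z, e, m) is ported as the corresponding mathematical function (z^e) % m;
-- left[i] / right[0] are in range for every nonempty input, so getD is exact there.
def phB : Nat → List Char → List Int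
  | 0, _ => []
  | Nat.succ fuel, cs =>
      let n := cs.length
      if n = 1 then [pvOrd (cs.getD 0 ' ')]
      else
        let mid := n / 2
        let left := phB fuel (cs.take mid)
        let right := phB fuel (cs.drop mid)
        ((List.range mid).map (fun i =>
          PySem.Int.mod (left.getD i 0 +
            PySem.Int.mod ((127:Int) ^ (mid - i)) 1000000007 * right.getD 0 0) 1000000007))
        ++ right

def prefix_hash_alt (s : String) : List Int := phB (s.toList.length + 1) s.toList

-- ===== PRECONDITION & SPEC =====
-- Pre_ excludes exactly the empty string, on which A raises IndexError at v[-1] = ord(s[-1]).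
def Pre_prefix_hash (s : String) : Prop := s ≠ ""
instance (s : String) : Decidable (Pre_prefix_hash s) := by unfold Pre_prefix_hash; infer_instance

def pvWitness_prefix_hash : String := "ab"

def Spec_prefix_hash (s : String) (out : List Int) : Prop := out = prefix_hash_alt s
instance (s : String) (out : List Int) : Decidable (Spec_prefix_hash s out) := by unfold Spec_prefix_hash; infer_instance

-- ===== CLAIM (what is proved, stated in full; the proofs are below) =====
def Claim_equal_prefix_hash : Prop := ∀ (s : String), Dom_prefix_hash s → Pre_prefix_hash s → Spec_prefix_hash s (prefix_hash s)

-- ===== LEMMAS AND PROOFS =====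

-- hash of the suffix starting with the given list (0 on []); interior steps take % m, the last char does not
def hsufL : List Char → Int
  | [] => 0
  | [c] => pvOrd c
  | c :: d :: l => PySem.Int.mod (hsufL (d :: l) * 127 + pvOrd c) 1000000007

-- the intended result: hash of every suffix, left to right
def specH : List Char → List Int
  | [] => []
  | c :: l => hsufL (c :: l) :: specH l

theorem getD_specH : ∀ (l : List Char) (i : Nat), i < l.length →
    (specH l).getD i 0 = hsufL (l.drop i) := by
  intro l
  induction l with
  | nil => intro i h; simp at h
  | cons c l ih =>
    intro i h
    cases i with
    | zero => simp [specH]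
    | succ i =>
      simp only [specH, List.getD_cons_succ, List.drop_succ_cons]
      exact ih i (by simpa using h)

-- hsufL with an explicit continuation
def hcont : List Char → Int → Int
  | [], acc => acc
  | c :: l, acc => PySem.Int.mod (hcont l acc * 127 + pvOrd c) 1000000007

theorem hsufL_append : ∀ (a b : List Char), b ≠ [] → hsufL (a ++ b) = hcont a (hsufL b) := by
  intro a b hb
  induction a with
  | nil => simp [hcont]
  | cons c a ih =>
    rcases a with _ | ⟨d, a⟩
    · rcases b with _ | ⟨e, b⟩
      · exact absurd rfl hb
      · simp [hsufL, hcont]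
    · simp only [List.cons_append, hsufL, hcont]
      rw [← List.cons_append, ih]
      simp only [hcont]

-- mod notation: PySem.Int.mod with positive modulus is emod
theorem pmod_eq (a : Int) : PySem.Int.mod a 1000000007 = a % 1000000007 :=
  PySem.Int.mod_eq_emod_of_pos (by norm_num)

-- absorb an inner % under + and * on the left
theorem emod_absorb_mul (y b c : Int) : (y % 1000000007 * b + c) % 1000000007 = (y * b + c) % 1000000007 := by
  rw [Int.add_emod, Int.mul_emod, Int.emod_emod_of_dvd y (dvd_refl _), ← Int.mul_emod, ← Int.add_emod]

theorem emod_absorb_mul_right (y b c : Int) : (b * (y % 1000000007) + c) % 1000000007 = (b * y + c) % 1000000007 := by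
  rw [Int.add_emod, Int.mul_emod, Int.emod_emod_of_dvd y (dvd_refl _), ← Int.mul_emod, ← Int.add_emod]

theorem emod_absorb_add (y c : Int) : (y % 1000000007 + c) % 1000000007 = (y + c) % 1000000007 := by
  rw [Int.add_emod, Int.emod_emod_of_dvd y (dvd_refl _), ← Int.add_emod]

-- linearity of the continuation hash
theorem hcont_linear : ∀ (a : List Char) (x : Int), a ≠ [] →
    hcont a x = (hsufL a + 127 ^ a.length * x) % 1000000007 := by
  intro a
  induction a with
  | nil => intro x h; exact absurd rfl h
  | cons c a ih =>
    intro x _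
    rcases a with _ | ⟨d, a⟩
    · simp only [hcont, hsufL, pmod_eq, List.length_cons, List.length_nil]
      ring_nf
    · have h := ih x (by simp)
      calc hcont (c :: d :: a) x
          = (hcont (d :: a) x * 127 + pvOrd c) % 1000000007 := by
            simp only [hcont, pmod_eq]
        _ = ((hsufL (d :: a) + 127 ^ (d :: a).length * x) % 1000000007 * 127 + pvOrd c)
              % 1000000007 := by rw [h]
        _ = ((hsufL (d :: a) + 127 ^ (d :: a).length * x) * 127 + pvOrd c) % 1000000007 :=
            emod_absorb_mul _ _ _
        _ = ((hsufL (d :: a) * 127 + pvOrd c) + 127 ^ (c :: d :: a).length * x)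
              % 1000000007 := by
            congr 1
            simp only [List.length_cons]
            ring
        _ = ((hsufL (d :: a) * 127 + pvOrd c) % 1000000007 + 127 ^ (c :: d :: a).length * x)
              % 1000000007 := (emod_absorb_add _ _).symm
        _ = (hsufL (c :: d :: a) + 127 ^ (c :: d :: a).length * x) % 1000000007 := by
            simp only [hsufL, pmod_eq]

-- specH splits over append
theorem specH_append : ∀ (u v : List Char),
    specH (u ++ v) = (List.range u.length).map (fun i => hsufL ((u ++ v).drop i)) ++ specH v := by
  intro u v
  induction u with
  | nil => simp
  | cons c u ih =>
    simp only [List.cons_append, specH, List.length_cons, List.range_succ_eq_map,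
      List.map_cons, List.map_map]
    rw [ih]
    simp [Function.comp]

theorem phB_eq_specH : ∀ (fuel : Nat) (cs : List Char), cs ≠ [] → cs.length ≤ fuel →
    phB fuel cs = specH cs := by
  intro fuel
  induction fuel with
  | zero =>
    intro cs hne hlen
    exact absurd (List.length_eq_zero_iff.mp (Nat.le_zero.mp hlen)) hne
  | succ fuel ih =>
    intro cs hne hlen
    have hn : 0 < cs.length := List.length_pos_iff.mpr hne
    simp only [phB]
    by_cases h1 : cs.length = 1
    · rw [if_pos h1]
      rcases cs with _ | ⟨c, l⟩
      · simp at hn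
      · have : l = [] := by simpa using h1
        subst this
        simp [specH, hsufL]
    · rw [if_neg h1]
      have hn2 : 2 ≤ cs.length := by omega
      set n := cs.length with hnn
      set mid := n / 2 with hmid
      have hmid1 : 1 ≤ mid := by omega
      have hmidn : mid < n := by omega
      have hlt : (cs.take mid).length = mid := by
        rw [List.length_take]; omega
      have hdl : (cs.drop mid).length = n - mid := by simp [hnn]
      have hL := ih (cs.take mid) (by rw [← List.length_pos_iff, hlt]; omega) (by omega)
      have hR := ih (cs.drop mid) (by rw [← List.length_pos_iff, hdl]; omega) (by omega)
      rw [hL, hR]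
      have hsplit : cs = cs.take mid ++ cs.drop mid := (List.take_append_drop mid cs).symm
      conv_rhs => rw [hsplit, specH_append]
      rw [hlt]
      congr 1
      apply List.map_congr_left
      intro i hi
      rw [List.mem_range] at hi
      have hdropne : (cs.take mid).drop i ≠ [] := by
        rw [← List.length_pos_iff, List.length_drop, hlt]; omega
      have hdroplen : ((cs.take mid).drop i).length = mid - i := by
        rw [List.length_drop, hlt]
      have hvne : cs.drop mid ≠ [] := by
        rw [← List.length_pos_iff, hdl]; omega
      have hdrop : (cs.take mid ++ cs.drop mid).drop i = (cs.take mid).drop i ++ cs.drop mid := by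
        rw [List.drop_append_of_le_length (by omega)]
      rw [hdrop, hsufL_append _ _ hvne, hcont_linear _ _ hdropne, hdroplen]
      rw [getD_specH _ i (by omega)]
      have hr0 : (specH (cs.drop mid)).getD 0 0 = hsufL (cs.drop mid) := by
        have := getD_specH (cs.drop mid) 0 (by omega)
        simpa using this
      rw [hr0, pmod_eq, pmod_eq]
      rw [Int.mul_comm ((127:Int) ^ (mid - i) % 1000000007), Int.mul_comm ((127:Int) ^ (mid - i))]
      rw [Int.add_comm (hsufL ((cs.take mid).drop i)), Int.add_comm (hsufL ((cs.take mid).drop i))]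
      exact emod_absorb_mul_right _ _ _

theorem alt_eq_specH (s : String) : prefix_hash_alt s = specH s.toList := by
  unfold prefix_hash_alt
  rcases h : s.toList with _ | ⟨c, l⟩
  · simp [phB, specH]
  · exact phB_eq_specH _ _ (by simp) (by simp)

theorem set_replicate_last : ∀ (k : Nat) (x : Int),
    (List.replicate (k + 1) (0 : Int)).set k x = List.replicate k 0 ++ [x] := by
  intro k
  induction k with
  | zero => intro x; simp
  | succ k ih =>
    intro x
    rw [List.replicate_succ, List.set_cons_succ, ih, List.replicate_succ]
    simp

theorem loopA_inv : ∀ (cs : List Char) (k : Nat), k < cs.length →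
    loopA cs k (List.replicate k 0 ++ specH (cs.drop k)) = specH cs := by
  intro cs k
  induction k with
  | zero => intro _; simp [loopA]
  | succ k ih =>
    intro hk
    have hk' : k < cs.length := Nat.lt_of_succ_lt hk
    have hlt : k + 1 < cs.length := hk
    have hdrop : cs.drop k = cs[k] :: cs.drop (k + 1) := List.drop_eq_getElem_cons hk'
    have hget : cs.getD k ' ' = cs[k] := List.getD_eq_getElem cs ' ' hk'
    have hdrop1 : cs.drop (k + 1) = cs[k+1] :: cs.drop (k + 2) := List.drop_eq_getElem_cons hlt
    have hvget : (List.replicate (k+1) (0:Int) ++ specH (cs.drop (k+1))).getD (k+1) 0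
        = hsufL (cs.drop (k+1)) := by
      rw [hdrop1]
      simp [List.getD, specH]
    have hnew : PySem.Int.mod (hsufL (cs.drop (k+1)) * 127 + pvOrd cs[k]) 1000000007
        = hsufL (cs.drop k) := by
      rw [hdrop, hdrop1]; simp [hsufL]
    have hset : (List.replicate (k+1) (0:Int) ++ specH (cs.drop (k+1))).set k (hsufL (cs.drop k))
        = List.replicate k 0 ++ specH (cs.drop k) := by
      rw [List.set_append]
      simp only [List.length_replicate]
      rw [if_pos (by omega), set_replicate_last]
      rw [hdrop, hdrop1]
      simp [specH, hsufL]
    simp only [loopA, hget, hvget, hnew, hset]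
    exact ih hk'

theorem a_eq_specH (s : String) (hs : s ≠ "") : prefix_hash s = specH s.toList := by
  unfold prefix_hash
  have hne : s.toList ≠ [] := by
    intro h
    apply hs
    have h2 : s.toList = ("" : String).toList := by simpa using h
    exact String.toList_injective h2
  set cs := s.toList with hcs
  have hn : 0 < cs.length := List.length_pos_iff.mpr hne
  have hlast : cs.drop (cs.length - 1) = [cs[cs.length - 1]] := by
    rw [List.drop_eq_getElem_cons (by omega : cs.length - 1 < cs.length)]
    rw [List.drop_eq_nil_of_le (by omega)]
  have hget : cs.getD (cs.length - 1) ' ' = cs[cs.length - 1] := List.getD_eq_getElem cs ' ' (by omega)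
  have hrep : List.replicate cs.length (0:Int) = List.replicate ((cs.length - 1) + 1) 0 := by
    congr 1; omega
  have hv : (List.replicate cs.length (0:Int)).set (cs.length - 1) (pvOrd (cs.getD (cs.length - 1) ' '))
      = List.replicate (cs.length - 1) 0 ++ specH (cs.drop (cs.length - 1)) := by
    rw [hrep, set_replicate_last, hlast, hget]
    simp [specH, hsufL]
  simp only [hv]
  exact loopA_inv cs (cs.length - 1) (by omega)

-- ===== VERDICT (by name: the statement is the Claim_ definition above) =====
theorem prefix_hash_spec : Claim_equal_prefix_hash := by
  intro s _ hpre
  unfold Spec_prefix_hash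
  rw [a_eq_specH s hpre, alt_eq_specH]
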